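-- pv_equiv track=rewrite | github.com/asarandi/advent-of-code | 2023-python/day_12/script.py | is_same_config
-- ===== SOURCE A (Python) =====
-- def is_same_config(n: int, s: str) -> bool:
--     for i in range(len(s) - 1, -1, -1):
--         if s[i] == "#":
--             if not (n & 1):
--                 return False
--         elif s[i] == ".":
--             if n & 1:
--                 return False
--         n = n >> 1
--     return True
-- ===== SOURCE B (Python) =====
-- def is_same_config(n: int, s: str) -> bool:
--     mask = 0
--     value = 0
--     for i, c in enumerate(reversed(s)):
--         if c == "#":
--             mask += 1 << i
--             value += 1 << i
--         elif c == ".":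
--             mask += 1 << i
--     return (n & mask) == value
-- ===== Notes on version B (the rewrite author's own statement) =====
-- stated objective: faster
-- what changed: Instead of scanning the bits of n right-to-left with destructive shifts and per-bit early returns, B builds two integers in one pass over the string (mask of constrained positions, value of required '#' bits) and decides the whole match with a single bitwise comparison (n & mask) == value.
import Mathlib
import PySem

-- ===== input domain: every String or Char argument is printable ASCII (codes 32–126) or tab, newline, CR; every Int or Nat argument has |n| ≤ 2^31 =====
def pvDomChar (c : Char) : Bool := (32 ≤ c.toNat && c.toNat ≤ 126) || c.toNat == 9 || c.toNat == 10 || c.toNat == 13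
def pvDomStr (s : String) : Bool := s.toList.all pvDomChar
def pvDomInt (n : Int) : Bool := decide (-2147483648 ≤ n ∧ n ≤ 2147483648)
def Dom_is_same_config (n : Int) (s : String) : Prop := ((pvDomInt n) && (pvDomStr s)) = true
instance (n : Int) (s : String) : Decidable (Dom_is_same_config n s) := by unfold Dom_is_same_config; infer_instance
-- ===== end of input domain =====

-- B replaces A's per-bit loop with destructive shifting and early returns by a one-pass
-- mask/value construction over the string and a single bitwise comparison (alternative).


-- ===== PORT A =====
-- the for-loop of A: iterates over the index list range(len(s)-1, -1, -1), shifting n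
def iscLoop (s : String) (idxs : List Int) (n : Int) : Bool :=
  match idxs with
  | [] => true
  | i :: rest =>
    match PySem.Str.pyGet? s i with
    | none => true   -- unreachable: every index produced by range(len(s)-1,-1,-1) is in range
    | some c =>
      if c = '#' then
        if PySem.Int.band n 1 = 0 then false else iscLoop s rest (n >>> (1 : Nat))
      else if c = '.' then
        if PySem.Int.band n 1 ≠ 0 then false else iscLoop s rest (n >>> (1 : Nat))
      else iscLoop s rest (n >>> (1 : Nat))

def is_same_config (n : Int) (s : String) : Bool :=
  iscLoop s (PySem.List.pyRange (PySem.Str.len s - 1) (-1) (-1)) n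

-- ===== PORT B =====
-- one pass over enumerate(reversed(s)) accumulating (mask, value); 1 << i is (1 : Int) <<< i.toNat
-- (the index i produced by enumerate is nonnegative, so .toNat is exact)
def is_same_config_alt (n : Int) (s : String) : Bool :=
  let p := (PySem.List.enumerate s.toList.reverse 0).foldl
    (fun (mv : Int × Int) (ic : Int × Char) =>
      if ic.2 = '#' then (mv.1 + ((1 : Int) <<< ic.1.toNat), mv.2 + ((1 : Int) <<< ic.1.toNat))
      else if ic.2 = '.' then (mv.1 + ((1 : Int) <<< ic.1.toNat), mv.2)
      else mv)
    ((0 : Int), (0 : Int))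
  PySem.Int.band n p.1 == p.2

-- ===== PRECONDITION & SPEC =====
def Spec_is_same_config (n : Int) (s : String) (out : Bool) : Prop := out = is_same_config_alt n s
instance (n : Int) (s : String) (out : Bool) : Decidable (Spec_is_same_config n s out) := by unfold Spec_is_same_config; infer_instance

-- ===== CLAIM (what is proved, stated in full; the proofs are below) =====
def Claim_equal_is_same_config : Prop := ∀ (n : Int) (s : String), Dom_is_same_config n s → Spec_is_same_config n s (is_same_config n s)

-- ===== LEMMAS AND PROOFS =====

-- proof-side closed forms of B's two accumulators, over the reversed character list
def pvM : List Char → Int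
  | [] => 0
  | c :: r => (if c = '#' ∨ c = '.' then 1 else 0) + 2 * pvM r

def pvV : List Char → Int
  | [] => 0
  | c :: r => (if c = '#' then 1 else 0) + 2 * pvV r

-- proof-side recursion equivalent to A's loop, directly on the reversed character list
def aRec : List Char → Int → Bool
  | [], _ => true
  | c :: r, n =>
    if c = '#' then
      if PySem.Int.band n 1 = 0 then false else aRec r (n >>> (1 : Nat))
    else if c = '.' then
      if PySem.Int.band n 1 ≠ 0 then false else aRec r (n >>> (1 : Nat))
    else aRec r (n >>> (1 : Nat))

lemma pvM_nonneg : ∀ l, 0 ≤ pvM l := by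
  intro l; induction l with
  | nil => simp [pvM]
  | cons c r ih => simp only [pvM]; split <;> omega

lemma nat_and_decomp (a b : Nat) : a &&& b = 2 * ((a / 2) &&& (b / 2)) + a % 2 * (b % 2) := by
  conv_lhs => rw [← Nat.bit_testBit_zero_shiftRight_one a, ← Nat.bit_testBit_zero_shiftRight_one b]
  rw [Nat.land_bit]
  simp only [Nat.bit_val, Nat.testBit_zero, Nat.shiftRight_one]
  rcases Nat.mod_two_eq_zero_or_one a with h | h <;> rcases Nat.mod_two_eq_zero_or_one b with h2 | h2 <;>
    simp [h, h2]

lemma shiftRight_one_eq (x : Int) : x >>> (1 : Nat) = x / 2 := by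
  rw [Int.shiftRight_eq_div_pow]; norm_num

-- one step of Python's & against a nonnegative right operand: low bit plus shifted rest
lemma band_decomp (x y : Int) (hy : 0 ≤ y) :
    PySem.Int.band x y =
      2 * PySem.Int.band (x >>> (1 : Nat)) (y >>> (1 : Nat)) + (x % 2) * (y % 2) := by
  rw [shiftRight_one_eq, shiftRight_one_eq]
  by_cases hx : 0 ≤ x
  · rw [PySem.Int.band, PySem.Int.band]
    rw [if_pos hx, if_pos hy, if_pos (by positivity : (0:Int) ≤ x / 2), if_pos (by positivity : (0:Int) ≤ y / 2)]
    have hxt : (x / 2).toNat = x.toNat / 2 := by omega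
    have hyt : (y / 2).toNat = y.toNat / 2 := by omega
    rw [hxt, hyt]
    have hd := nat_and_decomp x.toNat y.toNat
    have hax : x % 2 = ((x.toNat % 2 : Nat) : Int) := by omega
    have hay : y % 2 = ((y.toNat % 2 : Nat) : Int) := by omega
    rw [hax, hay]
    rcases Nat.mod_two_eq_zero_or_one x.toNat with h | h <;>
      rcases Nat.mod_two_eq_zero_or_one y.toNat with h2 | h2 <;>
      rw [h, h2] <;> rw [h, h2] at hd <;> push_cast <;> omega
  · have hx2 : x / 2 < 0 := by omega
    rw [PySem.Int.band, PySem.Int.band]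
    rw [if_neg hx, if_neg (by omega : ¬ (0:Int) ≤ x / 2), if_pos hy, if_pos (by positivity : (0:Int) ≤ y / 2)]
    have hc : (-(x / 2) - 1).toNat = (-x - 1).toNat / 2 := by omega
    have hyt : (y / 2).toNat = y.toNat / 2 := by omega
    rw [hc, hyt]
    have hd := nat_and_decomp y.toNat ((-x - 1).toNat)
    have hle1 : y.toNat &&& (-x - 1).toNat ≤ y.toNat := Nat.and_le_left
    have hle2 : y.toNat / 2 &&& (-x - 1).toNat / 2 ≤ y.toNat / 2 := Nat.and_le_left
    have hax : x % 2 = 1 - (((-x - 1).toNat % 2 : Nat) : Int) := by omega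
    have hay : y % 2 = ((y.toNat % 2 : Nat) : Int) := by omega
    rw [hax, hay]
    rcases Nat.mod_two_eq_zero_or_one ((-x - 1).toNat) with h | h <;>
      rcases Nat.mod_two_eq_zero_or_one y.toNat with h2 | h2 <;>
      rw [h, h2] <;> rw [h, h2] at hd <;> push_cast [hle1, hle2] <;> omega

-- A's recursion decides exactly B's bitwise comparison, on the reversed character list
lemma aRec_eq_band : ∀ (l : List Char) (n : Int),
    aRec l n = (PySem.Int.band n (pvM l) == pvV l) := by
  intro l
  induction l with
  | nil =>
    intro n
    simp [aRec, pvM, pvV, PySem.Int.band_zero]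
  | cons c r ih =>
    intro n
    have hb1 : PySem.Int.band n 1 = n % 2 := by
      rw [PySem.Int.band_one]
      -- Python's n % 2 is emod for the positive divisor 2
      simp only [PySem.Int.mod]
      rw [Int.fmod_eq_emod]
      norm_num
    have hdec := band_decomp n (pvM (c :: r)) (pvM_nonneg (c :: r))
    have hMs : pvM (c :: r) >>> (1 : Nat) = pvM r := by
      rw [shiftRight_one_eq]; simp only [pvM]; have := pvM_nonneg r; split <;> omega
    have hMm : pvM (c :: r) % 2 = (if c = '#' ∨ c = '.' then 1 else 0) := by
      simp only [pvM]; split <;> omega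
    rw [hMs, hMm] at hdec
    have hVc : pvV (c :: r) = (if c = '#' then 1 else 0) + 2 * pvV r := by
      simp only [pvV]
    have hnm : n % 2 = 0 ∨ n % 2 = 1 := by omega
    by_cases hc : c = '#'
    · rw [if_pos (Or.inl hc)] at hdec
      rw [if_pos hc] at hVc
      simp only [aRec, if_pos hc, hb1]
      rcases hnm with h0 | h1
      · rw [h0] at hdec
        rw [if_pos h0]
        symm; rw [beq_eq_false_iff_ne]
        omega
      · rw [h1] at hdec
        rw [if_neg (by omega), ih (n >>> (1 : Nat)), Bool.eq_iff_iff]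
        simp only [beq_iff_eq]
        omega
    · by_cases hd : c = '.'
      · rw [if_pos (Or.inr hd)] at hdec
        rw [if_neg hc] at hVc
        simp only [aRec, if_neg hc, if_pos hd, hb1]
        rcases hnm with h0 | h1
        · rw [h0] at hdec
          rw [if_neg (by omega), ih (n >>> (1 : Nat)), Bool.eq_iff_iff]
          simp only [beq_iff_eq]
          omega
        · rw [h1] at hdec
          rw [if_pos (by omega)]
          symm; rw [beq_eq_false_iff_ne]
          omega
      · rw [if_neg (not_or.mpr ⟨hc, hd⟩)] at hdec
        rw [if_neg hc] at hVc
        simp only [aRec, if_neg hc, if_neg hd]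
        rw [ih (n >>> (1 : Nat)), Bool.eq_iff_iff]
        simp only [beq_iff_eq]
        rcases hnm with h0 | h1 <;> [rw [h0] at hdec; rw [h1] at hdec] <;> omega

-- bridge: A's indexed countdown loop is aRec on the reversed k-prefix of the characters
lemma iscLoop_eq : ∀ (s : String) (k : Nat), k ≤ s.toList.length → ∀ n,
    iscLoop s (PySem.List.pyRange ((k : Int) - 1) (-1) (-1)) n
      = aRec ((s.toList.take k).reverse) n := by
  intro s k
  induction k with
  | zero =>
    intro _ n
    rw [PySem.List.pyRange_neg_one_eq_nil (by norm_num)]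
    simp [iscLoop, aRec]
  | succ k ih =>
    intro hk n
    have hk' : k < s.toList.length := by omega
    have hcons : PySem.List.pyRange (((k + 1 : Nat) : Int) - 1) (-1) (-1)
        = (k : Int) :: PySem.List.pyRange ((k : Int) - 1) (-1) (-1) := by
      have : (((k + 1 : Nat) : Int) - 1) = (k : Int) := by push_cast; ring
      rw [this, PySem.List.pyRange_neg_one_cons (by omega)]
    rw [hcons]
    have hget : PySem.Str.pyGet? s ((k : Nat) : Int) = some (s.toList[k]) := by
      rw [PySem.Str.pyGet?_natCast]; simp [List.getElem?_eq_getElem hk']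
    have htake : (s.toList.take (k + 1)).reverse = s.toList[k] :: (s.toList.take k).reverse := by
      rw [List.take_add_one]
      simp [List.getElem?_eq_getElem hk']
    rw [htake]
    simp only [iscLoop, hget, aRec]
    split
    · split <;> [rfl; exact ih (by omega) _]
    · split
      · split <;> [rfl; exact ih (by omega) _]
      · exact ih (by omega) _

-- bridge: B's foldl over enumerate computes (pvM, pvV) of the list, scaled by 2^start
lemma foldB_eq : ∀ (l : List Char) (j : Nat) (m v : Int),
    (PySem.List.enumerate l ((j : Nat) : Int)).foldl
      (fun (mv : Int × Int) (ic : Int × Char) =>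
        if ic.2 = '#' then (mv.1 + ((1 : Int) <<< ic.1.toNat), mv.2 + ((1 : Int) <<< ic.1.toNat))
        else if ic.2 = '.' then (mv.1 + ((1 : Int) <<< ic.1.toNat), mv.2)
        else mv)
      (m, v) = (m + pvM l * 2 ^ j, v + pvV l * 2 ^ j) := by
  intro l
  induction l with
  | nil => intro j m v; simp [PySem.List.enumerate_nil, pvM, pvV]
  | cons c r ih =>
    intro j m v
    simp only [Int.shiftLeft_eq, one_mul] at ih
    rw [PySem.List.enumerate_cons]
    have hj1 : ((j : Nat) : Int) + 1 = (((j + 1 : Nat)) : Int) := by push_cast; ring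
    simp only [List.foldl_cons, Int.toNat_natCast, Int.shiftLeft_eq, one_mul, hj1]
    by_cases hc : c = '#'
    · rw [if_pos hc, ih (j + 1)]
      simp only [pvM, pvV]
      rw [if_pos (Or.inl hc), if_pos hc, Prod.mk.injEq]
      constructor <;> ring
    · by_cases hd : c = '.'
      · rw [if_neg hc, if_pos hd, ih (j + 1)]
        simp only [pvM, pvV]
        rw [if_pos (Or.inr hd), if_neg hc, Prod.mk.injEq]
        constructor <;> ring
      · rw [if_neg hc, if_neg hd, ih (j + 1)]
        simp only [pvM, pvV]
        rw [if_neg (not_or.mpr ⟨hc, hd⟩), if_neg hc, Prod.mk.injEq]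
        constructor <;> ring

-- ===== VERDICT (by name: the statement is the Claim_ definition above) =====
theorem is_same_config_spec : Claim_equal_is_same_config := by
  intro n s _
  unfold Spec_is_same_config is_same_config is_same_config_alt
  rw [PySem.Str.len_eq]
  have hA := iscLoop_eq s s.toList.length (le_refl _) n
  rw [List.take_length] at hA
  have hB := foldB_eq s.toList.reverse 0 0 0
  simp only [Nat.cast_zero, pow_zero, mul_one, zero_add] at hB
  rw [hA, hB, aRec_eq_band]
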